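-- pv_equiv track=rewrite | github.com/vvolhejn/neural_network_smoothness | smooth/config.py | shorten_hyperparams
-- ===== SOURCE A (Python) =====
-- from typing import Dict, Any, List
-- from collections import defaultdict
--
-- def shorten_hyperparams(d: Dict[str, Any]):
--     """
--     >>> sorted(shorten_hyperparams({"a.b": 1, "c": 2, "d.e": 3, "f.e": 4}).items())
--     [('b', 1), ('c', 2), ('d.e', 3), ('f.e', 4)]
--     """
--     key_map = defaultdict(list)
--     for k in d:
--         k_short = k.split(".")[-1]
--         key_map[k_short].append(k)
--
--     res = {}
--     for k_short, old_keys in key_map.items():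
--         if len(old_keys) == 1:
--             res[k_short] = d[old_keys[0]]
--         else:
--             for k in old_keys:
--                 res[k] = d[k]
--
--     return res
-- ===== SOURCE B (Python) =====
-- def shorten_hyperparams(d):
--     # Rescan-per-segment formulation: ordered-dedup the last dot-segments, then
--     # for each segment filter the matching items from d directly (no defaultdict
--     # grouping pass and no dict-of-lists intermediate).
--     shorts = list(dict.fromkeys(k.split(".")[-1] for k in d))
--     res = {}
--     for s in shorts:
--         group = [(k, v) for k, v in d.items() if k.split(".")[-1] == s]
--         if len(group) == 1:
--             res[s] = group[0][1]
--         else: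
--             res.update(group)
--     return res
-- ===== Notes on version B (the rewrite author's own statement) =====
-- stated objective: alternative
-- what changed: Replaces A's defaultdict pass that groups full keys into a dict of lists with an ordered dedup of the last dot-segments followed by a direct filter of the input dict per segment, emitting short or full keys from the filtered (key, value) pairs without any d[k] re-lookup.
import Mathlib
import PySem

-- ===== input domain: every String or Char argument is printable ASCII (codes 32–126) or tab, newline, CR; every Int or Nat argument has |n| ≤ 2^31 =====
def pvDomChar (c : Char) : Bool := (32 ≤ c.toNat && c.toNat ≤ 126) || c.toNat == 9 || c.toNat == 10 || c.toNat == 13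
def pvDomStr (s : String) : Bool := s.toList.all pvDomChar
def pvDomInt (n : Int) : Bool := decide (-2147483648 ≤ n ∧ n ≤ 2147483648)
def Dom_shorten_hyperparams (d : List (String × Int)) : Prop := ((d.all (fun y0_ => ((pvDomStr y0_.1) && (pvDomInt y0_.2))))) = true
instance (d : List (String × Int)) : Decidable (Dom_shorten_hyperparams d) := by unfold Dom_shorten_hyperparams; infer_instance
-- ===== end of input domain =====

-- B replaces A's defaultdict grouping pass by an ordered dedup of the last dot-segments plus a
-- direct filter of d per segment (objective: alternative decomposition, same return value).

-- shared helper: k.split(".")[-1] — split? is some (separator "." ≠ ""), the result is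
-- nonempty, so the [-1] index cannot raise; pyGetD is its exact total form here.
def pvShort (k : String) : String :=
  PySem.List.pyGetD ((PySem.Str.split? k ".").getD []) (-1) ""

-- ===== PORT A =====
-- key_map = defaultdict(list); for k in d: key_map[k.split(".")[-1]].append(k)
def pvKeyMap (d : List (String × Int)) : PySem.Dict String (List String) :=
  d.foldl (fun m kv => m.modify (pvShort kv.1) [] (fun l => l ++ [kv.1])) PySem.Dict.empty

def shorten_hyperparams (d : List (String × Int)) : List (String × Int) :=
  -- res = {}; for k_short, old_keys in key_map.items(): …
  ((pvKeyMap d).items.foldl (fun r p =>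
      if p.2.length == 1 then
        -- res[k_short] = d[old_keys[0]]   (the key is in d, so this lookup cannot raise)
        r.insert p.1 ((PySem.Dict.mk d).getD (PySem.List.pyGetD p.2 0 "") 0)
      else
        -- for k in old_keys: res[k] = d[k]
        p.2.foldl (fun r k => r.insert k ((PySem.Dict.mk d).getD k 0)) r)
      PySem.Dict.empty).items

-- ===== PORT B =====
def shorten_hyperparams_alt (d : List (String × Int)) : List (String × Int) :=
  -- shorts = list(dict.fromkeys(k.split(".")[-1] for k in d)); then
  -- res = {}; for s in shorts: group = [(k, v) for k, v in d.items() if k.split(".")[-1] == s]; …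
  (((PySem.List.dedup (d.map (fun kv => pvShort kv.1)))).foldl (fun r s =>
      let group := d.filter (fun kv => pvShort kv.1 == s)
      if group.length == 1 then
        r.insert s (PySem.List.pyGetD group 0 ("", 0)).2
      else
        group.foldl (fun r kv => r.insert kv.1 kv.2) r)
      PySem.Dict.empty).items

-- ===== PRECONDITION & SPEC =====
-- Pre_ only states that the association list represents a Python dict: its keys are distinct
-- (a Python dict cannot hold duplicate keys, so this excludes no input A actually receives).
def Pre_shorten_hyperparams (d : List (String × Int)) : Prop := (d.map Prod.fst).Nodup
instance (d : List (String × Int)) : Decidable (Pre_shorten_hyperparams d) := by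
  unfold Pre_shorten_hyperparams; infer_instance

def pvWitness_shorten_hyperparams : (List (String × Int)) :=
  [("a.b", 1), ("c", 2), ("d.e", 3), ("f.e", 4)]

def Spec_shorten_hyperparams (d : List (String × Int)) (out : List (String × Int)) : Prop := out = shorten_hyperparams_alt d
instance (d : List (String × Int)) (out : List (String × Int)) : Decidable (Spec_shorten_hyperparams d out) := by unfold Spec_shorten_hyperparams; infer_instance

-- ===== CLAIM (what is proved, stated in full; the proofs are below) =====
def Claim_equal_shorten_hyperparams : Prop := ∀ (d : List (String × Int)), Dom_shorten_hyperparams d → Pre_shorten_hyperparams d → Spec_shorten_hyperparams d (shorten_hyperparams d)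

-- ===== LEMMAS AND PROOFS =====

-- a lookup in the dict view of d of a key that is paired with v in d yields v (keys distinct)
theorem pv_getD_mk_of_mem {d : List (String × Int)} {k : String} {v : Int}
    (hmem : (k, v) ∈ d) (hnd : (d.map Prod.fst).Nodup) :
    (PySem.Dict.mk d).getD k 0 = v :=
  PySem.Dict.getD_of_mem_items (PySem.Dict.mk d) hmem hnd 0

-- the two loop bodies agree on every short segment s (keys of d distinct)
theorem pv_step_eq (d : List (String × Int)) (hnd : (d.map Prod.fst).Nodup)
    (r : PySem.Dict String Int) (s : String) :
    (if (((d.filter (fun kv => pvShort kv.1 == s)).map Prod.fst).length == 1) then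
        r.insert s ((PySem.Dict.mk d).getD
          (PySem.List.pyGetD ((d.filter (fun kv => pvShort kv.1 == s)).map Prod.fst) 0 "") 0)
      else
        ((d.filter (fun kv => pvShort kv.1 == s)).map Prod.fst).foldl
          (fun r k => r.insert k ((PySem.Dict.mk d).getD k 0)) r) =
    (if ((d.filter (fun kv => pvShort kv.1 == s)).length == 1) then
        r.insert s (PySem.List.pyGetD (d.filter (fun kv => pvShort kv.1 == s)) 0 ("", 0)).2
      else
        (d.filter (fun kv => pvShort kv.1 == s)).foldl (fun r kv => r.insert kv.1 kv.2) r) := by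
  set g := d.filter (fun kv => pvShort kv.1 == s) with hg
  have hlen : (g.map Prod.fst).length = g.length := List.length_map ..
  rw [hlen]
  by_cases h1 : g.length = 1
  · obtain ⟨⟨k, v⟩, hkv⟩ := List.length_eq_one_iff.mp h1
    have hmemg : (k, v) ∈ g := hkv ▸ List.mem_singleton_self _
    have hmem : (k, v) ∈ d := by rw [hg] at hmemg; exact List.mem_of_mem_filter hmemg
    simp [hkv, PySem.List.pyGetD_zero_cons, pv_getD_mk_of_mem hmem hnd]
  · simp only [beq_iff_eq, h1, if_false]
    rw [List.foldl_map]
    refine PySem.List.foldl_congr_mem _ _ _ _ ?_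
    intro acc kv hkv
    have hmem : kv ∈ d := by rw [hg] at hkv; exact List.mem_of_mem_filter hkv
    rw [pv_getD_mk_of_mem (k := kv.1) (v := kv.2) (by simpa using hmem) hnd]

-- A's key_map has items  (s, keys of d whose short segment is s)  for s over the deduped shorts
theorem pv_keyMap_items (d : List (String × Int)) :
    (pvKeyMap d).items =
    (PySem.List.dedup (d.map (fun kv => pvShort kv.1))).map
      (fun s => (s, (d.filter (fun kv => pvShort kv.1 == s)).map Prod.fst)) := by
  set m := pvKeyMap d with hm
  rw [pvKeyMap] at hm
  have hkeys : m.keys = PySem.List.dedup (d.map (fun kv => pvShort kv.1)) := by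
    rw [hm, PySem.Dict.keys_foldl_modify_key d (fun kv => pvShort kv.1) []
          (fun _ kv => fun l => l ++ [kv.1]) PySem.Dict.empty]
    rw [PySem.Dict.keys_empty, PySem.Set.update_nil_left, PySem.List.dedup_eq_ofList]
  have hnd : m.keys.Nodup := by
    rw [hkeys, PySem.List.dedup_eq_ofList]; exact PySem.Set.nodup_ofList _
  have hgetD : ∀ s, m.getD s [] = (d.filter (fun kv => pvShort kv.1 == s)).map Prod.fst := by
    intro s
    have hfold : m = (d.map (fun kv => (pvShort kv.1, kv.1))).foldl
        (fun m p => m.modify p.1 [] (fun l => l ++ [p.2])) PySem.Dict.empty := by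
      rw [hm, List.foldl_map]
    rw [hfold, PySem.Dict.getD_foldl_modify_append, PySem.Dict.getD_empty, List.nil_append,
        List.filter_map]
    simp [List.map_map, Function.comp_def]
  rw [PySem.Dict.items_eq_map_keys m hnd [], hkeys]
  exact List.map_congr_left (fun s _ => by rw [hgetD s])

-- ===== VERDICT (by name: the statement is the Claim_ definition above) =====
theorem shorten_hyperparams_spec : Claim_equal_shorten_hyperparams := by
  intro d _ hnd
  unfold Spec_shorten_hyperparams shorten_hyperparams shorten_hyperparams_alt
  rw [pv_keyMap_items d, List.foldl_map]
  refine congrArg PySem.Dict.items ?_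
  refine PySem.List.foldl_congr_mem _ _ _ _ ?_
  intro r s _
  exact pv_step_eq d hnd r s
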